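-- pv_equiv track=rewrite | github.com/Krv-Analytics/Thema | thema/multiverse/universe/utils/starHelpers.py | convert_keys_to_alphabet
-- ===== SOURCE A (Python) =====
-- def convert_keys_to_alphabet(dictionary):
--     """Simple Helper function to make kmapper node labels more readable."""
--     base = 26  # Number of letters in the alphabet
--     new_dict = {}
--
--     keys = list(dictionary.keys())
--     for i, key in enumerate(keys):
--         # Calculate the position of each letter in the new key
--         position = i
--         new_key = ""
--         while position >= 0:
--             new_key = chr(ord("a") + (position % base)) + new_key
--             position = (position // base) - 1
--
--         new_dict[new_key] = dictionary[key]
--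
--     return new_dict
-- ===== SOURCE B (Python) =====
-- def convert_keys_to_alphabet(dictionary):
--     """Simple Helper function to make kmapper node labels more readable."""
--     new_dict = {}
--     label = []  # running label, list of chars, most significant first
--     for value in dictionary.values():
--         # increment the running label (bijective base-26 with carry)
--         i = len(label) - 1
--         while i >= 0 and label[i] == "z":
--             label[i] = "a"
--             i -= 1
--         if i < 0:
--             label.insert(0, "a")
--         else:
--             label[i] = chr(ord(label[i]) + 1)
--         new_dict["".join(label)] = value
--     return new_dict
-- ===== Notes on version B (the rewrite author's own statement) =====
-- stated objective: faster
-- what changed: B replaces A's per-key modulo/division loop (recomputing each bijective base-26 label from its integer index) with a single running label incremented in place with carry propagation, so label work is amortized O(1) per key instead of rebuilding the string from index arithmetic.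
import Mathlib
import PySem

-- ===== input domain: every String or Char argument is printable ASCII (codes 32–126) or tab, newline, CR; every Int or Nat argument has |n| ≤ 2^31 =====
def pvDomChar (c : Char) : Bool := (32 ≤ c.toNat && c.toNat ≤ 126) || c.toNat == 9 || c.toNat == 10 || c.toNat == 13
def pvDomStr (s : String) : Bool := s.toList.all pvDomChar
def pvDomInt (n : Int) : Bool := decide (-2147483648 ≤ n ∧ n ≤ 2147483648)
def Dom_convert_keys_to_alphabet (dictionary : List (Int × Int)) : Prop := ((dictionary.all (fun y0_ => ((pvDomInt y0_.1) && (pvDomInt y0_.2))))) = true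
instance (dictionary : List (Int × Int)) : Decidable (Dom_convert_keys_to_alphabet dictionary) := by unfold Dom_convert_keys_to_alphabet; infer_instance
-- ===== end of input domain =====

-- B changes the labelling mechanism: a running label incremented with carry instead of
-- recomputing each label from its index by modulo/division (objective: faster, measured).

-- ===== PORT A =====
-- A's while loop: 'while position >= 0: new_key = chr(ord("a") + position % 26) + new_key;
-- position = position // 26 - 1'.  position starts at the enumerate index i ≥ 0 and stays
-- ≥ 0 at every loop entry, so Int floordiv coincides with Nat division here (exact); the
-- loop re-enters iff position // 26 - 1 ≥ 0, i.e. position ≥ 26.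
def azLoop (position : Nat) (new_key : List Char) : List Char :=
  let new_key' := Char.ofNat (97 + position % 26) :: new_key
  if position < 26 then new_key' else azLoop (position / 26 - 1) new_key'
termination_by position
decreasing_by
  rename_i h
  have : position / 26 < position := Nat.div_lt_self (by omega) (by norm_num)
  omega

-- 'new_dict[new_key] = dictionary[key]': the labels produced for distinct indices are
-- distinct and dict keys are unique, so each assignment appends a fresh pair and
-- dictionary[key] is exactly the value paired with key in d.items — so we fold over
-- the enumerated items of the dict built from the input, appending; exact for dict semantics.
def convert_keys_to_alphabet (dictionary : List (Int × Int)) : List (String × Int) :=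
  let d := PySem.Dict.ofList dictionary
  (PySem.List.enumerate d.items).foldl
    (fun new_dict p =>
      new_dict ++ [(String.ofList (azLoop p.1.toNat []), p.2.2)]) []

-- ===== PORT B =====
-- B's in-place carry scan runs from the END of the label; the port keeps the label
-- REVERSED (least significant char first) so the scan is structural recursion, and
-- reverses when joining — same characters, same output string (exact).
def incRev (l : List Char) : List Char :=
  match l with
  | [] => ['a']                                   -- i < 0: prepend 'a'
  | c :: rest =>
    if c = 'z' then 'a' :: incRev rest            -- flip 'z' to 'a', carry left
    else Char.ofNat (c.toNat + 1) :: rest         -- increment, stop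

def convert_keys_to_alphabet_alt (dictionary : List (Int × Int)) : List (String × Int) :=
  let d := PySem.Dict.ofList dictionary
  (d.values.foldl
    (fun (st : List Char × List (String × Int)) v =>
      (incRev st.1, st.2 ++ [(String.ofList (incRev st.1).reverse, v)])) ([], [])).2

-- ===== PRECONDITION & SPEC =====
def Spec_convert_keys_to_alphabet (dictionary : List (Int × Int)) (out : List (String × Int)) : Prop := out = convert_keys_to_alphabet_alt dictionary
instance (dictionary : List (Int × Int)) (out : List (String × Int)) : Decidable (Spec_convert_keys_to_alphabet dictionary out) := by unfold Spec_convert_keys_to_alphabet; infer_instance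

-- ===== CLAIM (what is proved, stated in full; the proofs are below) =====
def Claim_equal_convert_keys_to_alphabet : Prop := ∀ (dictionary : List (Int × Int)), Dom_convert_keys_to_alphabet dictionary → Spec_convert_keys_to_alphabet dictionary (convert_keys_to_alphabet dictionary)

-- ===== LEMMAS AND PROOFS =====

-- the label of index n, least significant character first
def repR (n : Nat) : List Char :=
  Char.ofNat (97 + n % 26) :: (if n < 26 then [] else repR (n / 26 - 1))
termination_by n
decreasing_by
  rename_i h
  have : n / 26 < n := Nat.div_lt_self (by omega) (by norm_num)
  omega

theorem azLoop_eq_repR (n : Nat) (acc : List Char) :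
    azLoop n acc = (repR n).reverse ++ acc := by
  induction n using Nat.strong_induction_on generalizing acc with
  | _ n ih =>
    rw [azLoop, repR]
    by_cases h : n < 26
    · simp [h]
    · have hlt : n / 26 - 1 < n := by
        have : n / 26 < n := Nat.div_lt_self (by omega) (by norm_num)
        omega
      simp only [h, if_false, ih _ hlt]
      simp

theorem incRev_repR (n : Nat) : incRev (repR n) = repR (n + 1) := by
  induction n using Nat.strong_induction_on with
  | _ n ih =>
    rw [repR]
    by_cases hz : n % 26 = 25
    · -- last char is 'z': carry
      have hc : Char.ofNat (97 + n % 26) = 'z' := by rw [hz]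
      rw [incRev, if_pos hc]
      by_cases h26 : n < 26
      · -- n = 25 → "z" becomes "aa"
        have h25 : n = 25 := by omega
        subst h25
        rw [if_pos (by norm_num), incRev]
        rw [repR]; norm_num
        rw [repR]; norm_num
      · -- n ≥ 26: the carry increments the tail, by the IH at n/26 - 1
        have hlt : n / 26 - 1 < n := by
          have : n / 26 < n := Nat.div_lt_self (by omega) (by norm_num)
          omega
        rw [if_neg h26, ih _ hlt]
        have hstep : n / 26 - 1 + 1 = n / 26 := by
          have : 1 ≤ n / 26 := (Nat.one_le_div_iff (by norm_num)).mpr (by omega)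
          omega
        rw [hstep]
        conv_rhs => rw [repR]
        rw [if_neg (by omega : ¬ (n + 1 < 26))]
        have hmod : (n + 1) % 26 = 0 := by omega
        have hdiv : (n + 1) / 26 - 1 = n / 26 := by omega
        rw [hdiv, hmod]
    · -- last char below 'z': increment it in place
      have hk : n % 26 < 25 := by omega
      have hne : Char.ofNat (97 + n % 26) ≠ 'z' := by
        interval_cases h : (n % 26) <;> decide
      have htn : (Char.ofNat (97 + n % 26)).toNat + 1 = 97 + (n % 26 + 1) := by
        interval_cases h : (n % 26) <;> decide
      rw [incRev, if_neg hne, htn]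
      conv_rhs => rw [repR]
      have hmod : (n + 1) % 26 = n % 26 + 1 := by omega
      have hdiv : (n + 1) / 26 - 1 = n / 26 - 1 := by omega
      have hiff : (n + 1 < 26) ↔ (n < 26) := by omega
      rw [hmod, hdiv]
      simp only [hiff]

-- A's output from index i on, as a direct recursion over the values
def outA (i : Nat) : List Int → List (String × Int)
  | [] => []
  | v :: t => (String.ofList (azLoop i []), v) :: outA (i + 1) t

theorem foldA_eq_outA (items : List (Int × Int)) (i : Nat) (acc : List (String × Int)) :
    ((PySem.List.enumerate items (i : Int)).foldl
      (fun new_dict p => new_dict ++ [(String.ofList (azLoop p.1.toNat []), p.2.2)]) acc)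
    = acc ++ outA i (items.map (·.2)) := by
  induction items generalizing i acc with
  | nil => simp [PySem.List.enumerate_nil, outA]
  | cons x t ih =>
    rw [PySem.List.enumerate_cons]
    simp only [List.foldl_cons]
    have : ((i : Int) + 1) = ((i + 1 : Nat) : Int) := by push_cast; ring
    rw [this, ih]
    simp [outA, Int.toNat_natCast]

theorem foldB_eq_outA (vs : List Int) (n : Nat) (acc : List (String × Int)) :
    (vs.foldl
      (fun (st : List Char × List (String × Int)) v =>
        (incRev st.1, st.2 ++ [(String.ofList (incRev st.1).reverse, v)])) (repR n, acc)).2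
    = acc ++ outA (n + 1) vs := by
  induction vs generalizing n acc with
  | nil => simp [outA]
  | cons v t ih =>
    simp only [List.foldl_cons, incRev_repR]
    rw [ih]
    simp [outA, azLoop_eq_repR]

-- ===== VERDICT (by name: the statement is the Claim_ definition above) =====
theorem convert_keys_to_alphabet_spec : Claim_equal_convert_keys_to_alphabet := by
  intro dictionary _
  unfold Spec_convert_keys_to_alphabet convert_keys_to_alphabet convert_keys_to_alphabet_alt
  simp only []
  set d := PySem.Dict.ofList dictionary with hd
  have hA := foldA_eq_outA d.items 0 []
  simp only [Nat.cast_zero] at hA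
  rw [hA]
  have hvals : d.values = d.items.map (·.2) := rfl
  rw [hvals]
  cases hitems : d.items.map (·.2) with
  | nil => simp [outA]
  | cons v t =>
    simp only [List.foldl_cons, List.nil_append]
    have h0 : incRev ([] : List Char) = repR 0 := by
      rw [incRev, repR]; norm_num
    rw [h0, foldB_eq_outA]
    simp [outA, azLoop_eq_repR]
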